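-- pv_equiv track=rewrite | github.com/cwyman19/CPSC322-FinalProject | mysklearn/myclassifiers.py | compare_instances
-- ===== SOURCE A (Python) =====
-- def compare_instances(instances):
--     """Compares instances to find the majority class label.
--
--     Args:
--         instances (list): List of instances (rows of data).
--
--     Returns:
--         tuple: The majority class label and its count.
--     """
--     count = {}
--     for instance in instances:
--         if instance[-1] not in count:
--             count[instance[-1]] = 1
--         else:
--             count[instance[-1]] = count[instance[-1]] + 1
--     max_value = 0
--     class_value = 0
--     for key, value in count.items():
--         if value > max_value:
--             max_value = value
--             class_value = key
--         elif value == max_value: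
--             alphabetical = []
--             alphabetical.append(class_value)
--             alphabetical.append(key)
--             alphabetical.sort()
--             class_value = alphabetical[0]
--     return class_value, max_value
-- ===== SOURCE B (Python) =====
-- def compare_instances(instances):
--     """Compares instances to find the majority class label.
--
--     Returns:
--         tuple: The majority class label and its count.
--     """
--     count = {}
--     for instance in instances:
--         label = instance[-1]
--         count[label] = count.get(label, 0) + 1
--     max_count = max(count.values())
--     class_value = min(k for k, v in count.items() if v == max_count)
--     return class_value, max_count
-- ===== Notes on version B (the rewrite author's own statement) =====
-- stated objective: simpler
-- what changed: Replaces A's single running-max loop with inline pairwise-sort tie-breaking by a compute-global-max pass followed by a min-over-keys-achieving-max filter pass.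
-- outside the precondition, e.g. on compare_instances([]): A returns (0, 0), B raises ValueError
import Mathlib
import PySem

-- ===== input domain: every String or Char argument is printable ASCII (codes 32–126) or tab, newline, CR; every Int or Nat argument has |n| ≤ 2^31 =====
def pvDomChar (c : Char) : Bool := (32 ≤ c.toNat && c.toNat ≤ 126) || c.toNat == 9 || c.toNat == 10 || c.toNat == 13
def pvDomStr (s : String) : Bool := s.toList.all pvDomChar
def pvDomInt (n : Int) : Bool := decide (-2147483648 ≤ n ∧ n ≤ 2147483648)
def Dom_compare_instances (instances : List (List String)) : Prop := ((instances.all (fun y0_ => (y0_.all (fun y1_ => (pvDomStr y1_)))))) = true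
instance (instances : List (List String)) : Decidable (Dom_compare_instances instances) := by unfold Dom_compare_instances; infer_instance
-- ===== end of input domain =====

-- B changes only the selection phase: a global-max pass then a min-filter pass, instead of A's
-- running-max loop with inline pairwise-sort tie-breaking (objective: simpler).

-- ===== PORT A =====
-- A's second loop body: running (max_value, class_value) state; ties broken by
-- building a two-element list, sorting it, taking element 0 (headD is safe: the list is nonempty).
def ciStep (st : Int × String) (kv : String × Int) : Int × String :=
  if kv.2 > st.1 then (kv.2, kv.1)
  else if kv.2 = st.1 then (st.1, (PySem.List.sorted [st.2, kv.1] (fun x => x) false).headD st.2)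
  else st

-- Python's initial class_value = 0 (an int) is unrepresentable in String; "" stands in.
-- Under Pre_ every count value is ≥ 1 > 0 = max_value, so the tie branch never sees it.
def compare_instances (instances : List (List String)) : String × Int :=
  let count := instances.foldl (fun d row =>
    match PySem.List.pyGet? row (-1) with
    | none => d            -- IndexError in Python: outside Pre_
    | some l =>
      match d.get? l with
      | none => d.insert l 1
      | some v => d.insert l (v + 1)) PySem.Dict.empty
  let r := count.items.foldl ciStep (0, "")
  (r.2, r.1)

-- ===== PORT B =====
def compare_instances_alt (instances : List (List String)) : String × Int :=
  let count := instances.foldl (fun d row =>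
    match PySem.List.pyGet? row (-1) with
    | none => d            -- IndexError in Python: outside Pre_
    | some label => d.insert label (d.getD label 0 + 1)) PySem.Dict.empty
  match PySem.List.max? count.values (fun v => v) with
  | none => ("", 0)        -- max() on empty: ValueError in Python, outside Pre_
  | some m =>
    match PySem.List.min? ((count.items.filter (fun p => p.2 = m)).map (·.1)) (fun k => k) with
    | none => ("", 0)      -- unreachable: some value equals the max
    | some c => (c, m)

-- ===== PRECONDITION & SPEC =====
-- Pre_ excludes the empty instance list, where A returns the int sentinels (0, 0) — not a value of
-- the declared String × Int — and rows that are empty lists, where A raises IndexError.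
def Pre_compare_instances (instances : List (List String)) : Prop :=
  instances ≠ [] ∧ ∀ r ∈ instances, r ≠ []
instance (instances : List (List String)) : Decidable (Pre_compare_instances instances) := by
  unfold Pre_compare_instances; infer_instance
def pvWitness_compare_instances : List (List String) := [["a", "x"], ["y"], ["b", "x"]]
def Spec_compare_instances (instances : List (List String)) (out : String × Int) : Prop := out = compare_instances_alt instances
instance (instances : List (List String)) (out : String × Int) : Decidable (Spec_compare_instances instances out) := by unfold Spec_compare_instances; infer_instance

-- ===== CLAIM (what is proved, stated in full; the proofs are below) =====
def Claim_equal_compare_instances : Prop := ∀ (instances : List (List String)), Dom_compare_instances instances → Pre_compare_instances instances → Spec_compare_instances instances (compare_instances instances)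

-- ===== LEMMAS AND PROOFS =====

-- the last label of a row (rows are nonempty under Pre_)
def ciLast (r : List String) : String := r.getLast?.getD ""
def ciLabels (instances : List (List String)) : List String := instances.map ciLast

-- running max of the values, seeded with m
def ciF (l : List (String × Int)) (m : Int) : Int := l.foldl (fun a p => max a p.2) m
-- keys whose value equals M, in order
def ciSel (l : List (String × Int)) (M : Int) : List String :=
  (l.filter (fun p => p.2 = M)).map (·.1)

lemma ciStep_eq (st : Int × String) (kv : String × Int) :
    ciStep st kv = if kv.2 > st.1 then (kv.2, kv.1)
      else if kv.2 = st.1 then (st.1, min st.2 kv.1) else st := by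
  unfold ciStep
  rcases st with ⟨m, c⟩
  by_cases h1 : kv.2 > m <;> simp [h1]
  by_cases h2 : kv.2 = m <;> simp [h2]
  -- sorted [c, kv.1] id = if kv.1 < c then [kv.1, c] else [c, kv.1]
  show (PySem.List.sorted [c, kv.1] (fun x => x) false).head?.getD c = min c kv.1
  rw [PySem.List.sorted_eq_foldl_insertBy]
  simp only [List.foldl, PySem.List.insertBy]
  rcases lt_or_ge kv.1 c with h | h
  · simp [h, min_eq_right (le_of_lt h)]
  · have : ¬ kv.1 < c := not_lt.mpr h
    simp [this, min_eq_left h]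

lemma ciF_le (l : List (String × Int)) (m : Int) : m ≤ ciF l m := by
  induction l generalizing m with
  | nil => simp [ciF]
  | cons p t ih =>
    calc m ≤ max m p.2 := le_max_left _ _
    _ ≤ ciF t (max m p.2) := ih _
    _ = ciF (p :: t) m := rfl

-- the characterisation of A's selection loop
lemma ciLoop_char (l : List (String × Int)) (m : Int) (c : String) :
    (l.foldl ciStep (m, c)).1 = ciF l m
    ∧ (m = ciF l m → (l.foldl ciStep (m, c)).2 = (ciSel l (ciF l m)).foldl min c)
    ∧ (m ≠ ciF l m → ∃ k t, ciSel l (ciF l m) = k :: t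
        ∧ (l.foldl ciStep (m, c)).2 = t.foldl min k) := by
  induction l generalizing m c with
  | nil => simp [ciF, ciSel]
  | cons p t ih =>
    have hF : ciF (p :: t) m = ciF t (max m p.2) := rfl
    have hfold : (p :: t).foldl ciStep (m, c) = t.foldl ciStep (ciStep (m, c) p) := rfl
    rw [hfold, hF]
    rw [ciStep_eq]
    rcases lt_trichotomy m p.2 with hlt | heq | hgt
    · -- new max
      have hmax : max m p.2 = p.2 := max_eq_right (le_of_lt hlt)
      rw [if_pos hlt, hmax]
      obtain ⟨ih1, ih2, ih3⟩ := ih p.2 p.1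
      have hne : m ≠ ciF t p.2 := by
        have := ciF_le t p.2; omega
      refine ⟨ih1, fun h => absurd h hne, fun _ => ?_⟩
      by_cases hp : p.2 = ciF t p.2
      · -- p participates in the selection
        refine ⟨p.1, ciSel t (ciF t p.2), ?_, ?_⟩
        · simp only [ciSel, List.filter_cons, decide_eq_true hp, if_true, List.map_cons]
        · exact ih2 hp
      · obtain ⟨k, tt, hsel, hres⟩ := ih3 hp
        refine ⟨k, tt, ?_, hres⟩
        simpa [ciSel, hp] using hsel
    · -- tie
      have hmax : max m p.2 = m := by omega
      have hng : ¬ p.2 > m := by omega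
      rw [if_neg hng, if_pos heq.symm, hmax]
      obtain ⟨ih1, ih2, ih3⟩ := ih m (min c p.1)
      refine ⟨ih1, fun h => ?_, fun h => ?_⟩
      · have hp : p.2 = ciF t m := by omega
        have : ciSel (p :: t) (ciF t m) = p.1 :: ciSel t (ciF t m) := by
          simp only [ciSel, List.filter_cons, decide_eq_true hp, if_true, List.map_cons]
        rw [this]
        simpa using ih2 h
      · have hp : p.2 ≠ ciF t m := by omega
        obtain ⟨k, tt, hsel, hres⟩ := ih3 h
        refine ⟨k, tt, ?_, hres⟩
        simpa [ciSel, hp] using hsel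
    · -- smaller: state unchanged
      have hmax : max m p.2 = m := max_eq_left (le_of_lt hgt)
      have hng : ¬ p.2 > m := by omega
      have hne : p.2 ≠ m := by omega
      rw [if_neg hng, if_neg hne, hmax]
      obtain ⟨ih1, ih2, ih3⟩ := ih m c
      refine ⟨ih1, fun h => ?_, fun h => ?_⟩
      · have hp : p.2 ≠ ciF t m := by have := ciF_le t m; omega
        rw [show ciSel (p :: t) (ciF t m) = ciSel t (ciF t m) by simp [ciSel, hp]]
        exact ih2 h
      · have hp : p.2 ≠ ciF t m := by have := ciF_le t m; omega
        obtain ⟨k, tt, hsel, hres⟩ := ih3 h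
        exact ⟨k, tt, by simpa [ciSel, hp] using hsel, hres⟩

-- both count-building loops compute Counter(labels) under Pre_
lemma ciCount_eq (instances : List (List String)) (h : ∀ r ∈ instances, r ≠ []) (d : PySem.Dict String Int) :
    instances.foldl (fun d row =>
      match PySem.List.pyGet? row (-1) with
      | none => d
      | some l =>
        match d.get? l with
        | none => d.insert l 1
        | some v => d.insert l (v + 1)) d
    = (ciLabels instances).foldl (fun d x => d.insert x (d.getD x 0 + 1)) d := by
  induction instances generalizing d with
  | nil => rfl
  | cons r t ih =>
    have hr : r ≠ [] := h r (by simp)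
    obtain ⟨l, hl⟩ := Option.isSome_iff_exists.mp (List.getLast?_isSome.mpr hr)
    have hget : PySem.List.pyGet? r (-1) = some l := by
      rw [PySem.List.pyGet?_neg_one, hl]
    have hlast : ciLast r = l := by simp [ciLast, hl]
    simp only [List.foldl_cons, ciLabels, List.map_cons, hget, hlast]
    rw [show (match d.get? l with
      | none => d.insert l 1
      | some v => d.insert l (v + 1)) = d.insert l (d.getD l 0 + 1) by
      rcases hd : d.get? l with _ | v <;>
        simp [PySem.Dict.getD_eq_get?_getD, hd]]
    exact ih (fun r hr' => h r (by simp [hr'])) _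

lemma ciCountB_eq (instances : List (List String)) (h : ∀ r ∈ instances, r ≠ []) (d : PySem.Dict String Int) :
    instances.foldl (fun d row =>
      match PySem.List.pyGet? row (-1) with
      | none => d
      | some label => d.insert label (d.getD label 0 + 1)) d
    = (ciLabels instances).foldl (fun d x => d.insert x (d.getD x 0 + 1)) d := by
  induction instances generalizing d with
  | nil => rfl
  | cons r t ih =>
    have hr : r ≠ [] := h r (by simp)
    obtain ⟨l, hl⟩ := Option.isSome_iff_exists.mp (List.getLast?_isSome.mpr hr)
    have hget : PySem.List.pyGet? r (-1) = some l := by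
      rw [PySem.List.pyGet?_neg_one, hl]
    have hlast : ciLast r = l := by simp [ciLast, hl]
    simp only [List.foldl_cons, ciLabels, List.map_cons, hget, hlast]
    exact ih (fun r hr' => h r (by simp [hr'])) _

-- ===== VERDICT (by name: the statement is the Claim_ definition above) =====
theorem compare_instances_spec : Claim_equal_compare_instances := by
  intro instances _ hpre
  obtain ⟨hne, hrows⟩ := hpre
  unfold Spec_compare_instances compare_instances compare_instances_alt
  rw [ciCount_eq instances hrows, ciCountB_eq instances hrows]
  rw [PySem.Dict.foldl_insert_getD_add_one_eq_counter]
  set labels := ciLabels instances with hlab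
  have hlne : labels ≠ [] := by
    simp [hlab, ciLabels]; exact hne
  set cnt := PySem.Dict.counter labels with hcnt
  have hitems : cnt.items = (PySem.Set.ofList labels).map (fun k => (k, (labels.count k : Int))) :=
    PySem.Dict.items_counter labels
  -- items is nonempty and all its values are ≥ 1
  have hvals : ∀ p ∈ cnt.items, 1 ≤ p.2 := by
    intro p hp
    rw [hitems] at hp
    obtain ⟨k, hk, rfl⟩ := List.mem_map.mp hp
    have hk' : k ∈ labels := (PySem.Set.mem_ofList _ _).mp hk
    have hc : 0 < labels.count k := List.count_pos_iff.mpr hk'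
    show (1:Int) ≤ (labels.count k : Int)
    omega
  have hine : cnt.items ≠ [] := by
    rw [hitems]
    simp only [ne_eq, List.map_eq_nil_iff]
    intro hsl
    rcases labels with _ | ⟨x, xs⟩
    · exact hlne rfl
    · have : x ∈ PySem.Set.ofList (x :: xs) := (PySem.Set.mem_ofList _ _).mpr (by simp)
      rw [hsl] at this; exact absurd this (by simp)
  obtain ⟨i0, irest, hicons⟩ := List.exists_cons_of_ne_nil hine
  -- A's loop characterisation, from the initial state (0, "")
  obtain ⟨h1, _, h3⟩ := ciLoop_char cnt.items 0 ""
  have hM1 : 1 ≤ ciF cnt.items 0 := by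
    rw [hicons]
    have : i0.2 ≤ ciF irest (max 0 i0.2) := le_trans (le_max_right _ _) (ciF_le _ _)
    have hv : 1 ≤ i0.2 := hvals i0 (by rw [hicons]; simp)
    calc (1:Int) ≤ i0.2 := hv
    _ ≤ ciF irest (max 0 i0.2) := this
    _ = ciF (i0 :: irest) 0 := rfl
  have h0ne : (0:Int) ≠ ciF cnt.items 0 := by omega
  obtain ⟨k, tt, hsel, hres⟩ := h3 h0ne
  -- B's max: values = items.map snd
  have hvalues : cnt.values = cnt.items.map (·.2) := rfl
  have hmax : PySem.List.max? cnt.values (fun v => v)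
      = some (ciF cnt.items 0) := by
    rw [hvalues, hicons, List.map_cons, PySem.List.max?_id_cons]
    congr 1
    have : ciF (i0 :: irest) 0 = ciF irest (max 0 i0.2) := rfl
    rw [this, show max 0 i0.2 = i0.2 from max_eq_right (by have := hvals i0 (by rw [hicons]; simp); omega)]
    show (irest.map (·.2)).foldl max i0.2 = ciF irest i0.2
    rw [List.foldl_map]; rfl
  have hmin : PySem.List.min? ((cnt.items.filter (fun p => p.2 = ciF cnt.items 0)).map (·.1)) (fun k => k)
      = some (tt.foldl min k) := by
    have : (cnt.items.filter (fun p => p.2 = ciF cnt.items 0)).map (·.1) = k :: tt := by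
      simpa [ciSel] using hsel
    rw [show ((cnt.items.filter (fun p => decide (p.2 = ciF cnt.items 0))).map (·.1)) = k :: tt from this,
      PySem.List.min?_id_cons]
  simp only [h1, hres, hmax, hmin]
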